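-- pv_equiv track=rewrite | github.com/DanteDeRuwe/fys-ster-programmeren-1 | Reeks05/telefoonburen.py | vervangen
-- ===== SOURCE A (Python) =====
-- def vervangen(layout, nummer):
--     """
--     >>> vervangen('0472/91.39.17', 1234567890)
--     '1234/56.78.90'
--     >>> vervangen('++32 (0)9 264 4779', 123456789)
--     '++00 (1)2 345 6789'
--     """
--     layout = list(layout)
--     nummer = str(nummer)
--     layposlijst = []
--     for i, element in enumerate(layout):
--         if element.isdigit():
--             layposlijst.append(i) #lijst met alle posities in de layout waar cijfers staan
--     verschil = len(nummer) - len(layposlijst)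
--     if verschil < 0:
--         nummer = abs(verschil) * '0' + nummer
--     for j, pos in enumerate(layposlijst):
--         layout[pos] = nummer[j]
--     return ''.join(layout)
-- ===== SOURCE B (Python) =====
-- def _split_run(s):
--     # maximal prefix of s whose chars share the digit-ness of s[0]
--     d = s[0].isdigit()
--     k = 1
--     while k < len(s) and s[k].isdigit() == d:
--         k += 1
--     return d, s[:k], s[k:]
--
--
-- def vervangen(layout, nummer):
--     # run-length decomposition: cut the layout into maximal digit / non-digit
--     # runs, then rebuild it by splicing slices of the (zero-padded) number
--     # over the digit runs and keeping the non-digit runs verbatim.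
--     runs = []
--     rest = layout
--     while rest:
--         d, run, rest = _split_run(rest)
--         runs.append((d, run))
--     s = str(nummer)
--     slots = sum(len(r) for d, r in runs if d)
--     if len(s) < slots:
--         s = '0' * (slots - len(s)) + s
--     out = []
--     for d, r in runs:
--         if d:
--             out.append(s[:len(r)])
--             s = s[len(r):]
--         else:
--             out.append(r)
--     return ''.join(out)
-- ===== Notes on version B (the rewrite author's own statement) =====
-- stated objective: alternative
-- what changed: Replaces A's digit-position index list and in-place per-character list mutation with a run-length decomposition: the layout is cut into maximal digit/non-digit runs and rebuilt by splicing slices of the zero-padded number over the digit runs.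
import Mathlib
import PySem

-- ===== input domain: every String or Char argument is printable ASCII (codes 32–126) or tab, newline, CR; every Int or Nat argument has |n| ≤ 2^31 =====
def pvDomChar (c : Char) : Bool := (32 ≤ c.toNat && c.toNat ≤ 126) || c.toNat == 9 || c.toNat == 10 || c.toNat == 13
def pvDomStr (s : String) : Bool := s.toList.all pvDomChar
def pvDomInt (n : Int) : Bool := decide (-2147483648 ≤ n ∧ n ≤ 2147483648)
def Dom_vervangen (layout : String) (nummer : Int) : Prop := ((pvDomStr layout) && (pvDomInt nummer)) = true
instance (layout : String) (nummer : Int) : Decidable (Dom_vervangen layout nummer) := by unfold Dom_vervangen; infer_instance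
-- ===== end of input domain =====

-- B replaces A's digit-position list and in-place mutation with a run-length
-- decomposition of the layout, splicing slices of the padded number over the
-- digit runs (objective: alternative).

-- ===== PORT A =====
def vervangen (layout : String) (nummer : Int) : String :=
  let l := layout.toList
  let s := (PySem.Int.toStr nummer).toList
  let laypos := (PySem.List.enumerate l 0).foldl
      (fun acc ic => if PySem.Chars.isdigit ic.2 then acc ++ [ic.1] else acc) ([] : List Int)
  let verschil : Int := (s.length : Int) - (laypos.length : Int)
  let s' := if verschil < 0 then List.replicate verschil.natAbs '0' ++ s else s
  let l' := (PySem.List.enumerate laypos 0).foldl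
      (fun acc jp =>
        match PySem.List.pyGet? s' jp.1 with
        | some ch => PySem.List.pySetD acc jp.2 ch
        | none => acc) l  -- none unreachable: j < len(s') always; totality guard only
  String.ofList l'

-- ===== PORT B =====
-- _split_run: the k-while loop computes exactly the length of the maximal prefix of
-- the tail sharing the head's digit-ness, i.e. takeWhile/dropWhile (exact).
def vSplitRun (c : Char) (s : List Char) : Bool × List Char × List Char :=
  let d := PySem.Chars.isdigit c
  (d, c :: s.takeWhile (fun x => PySem.Chars.isdigit x == d),
      s.dropWhile (fun x => PySem.Chars.isdigit x == d))

-- the `while rest:` loop collecting (d, run) pairs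
def vRuns : List Char → List (Bool × List Char)
  | [] => []
  | c :: cs =>
    let r := vSplitRun c cs
    (r.1, r.2.1) :: vRuns r.2.2
termination_by l => l.length
decreasing_by
  simp only [vSplitRun, List.length_cons]
  have := List.length_dropWhile_le (fun x => PySem.Chars.isdigit x == PySem.Chars.isdigit c) cs
  omega

-- the output loop: splice s[:len(r)] over a digit run (python slices with
-- nonnegative bounds = take/drop, exact), keep a non-digit run verbatim
def vFill : List (Bool × List Char) → List Char → List Char
  | [], _ => []
  | (d, r) :: rs, s =>
    if d then s.take r.length ++ vFill rs (s.drop r.length)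
    else r ++ vFill rs s

def vervangen_alt (layout : String) (nummer : Int) : String :=
  let runs := vRuns layout.toList
  let s := (PySem.Int.toStr nummer).toList
  let slots := runs.foldl (fun a dr => if dr.1 then a + dr.2.length else a) 0
  let s' := if s.length < slots then List.replicate (slots - s.length) '0' ++ s else s
  String.ofList (vFill runs s')

-- ===== PRECONDITION & SPEC =====
def Spec_vervangen (layout : String) (nummer : Int) (out : String) : Prop := out = vervangen_alt layout nummer
instance (layout : String) (nummer : Int) (out : String) : Decidable (Spec_vervangen layout nummer out) := by unfold Spec_vervangen; infer_instance

-- ===== CLAIM (what is proved, stated in full; the proofs are below) =====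
def Claim_equal_vervangen : Prop := ∀ (layout : String) (nummer : Int), Dom_vervangen layout nummer → Spec_vervangen layout nummer (vervangen layout nummer)

-- ===== LEMMAS AND PROOFS =====

-- proof-side middle man: per-character streaming substitution; both A's fold and
-- B's run splicing are shown equal to it
def vGo : List Char → List Char → List Char
  | [], _ => []
  | c :: cs, num =>
    if PySem.Chars.isdigit c then
      match num with
      | n :: ns => n :: vGo cs ns
      | [] => []
    else c :: vGo cs num

-- equation lemmas for the well-founded vRuns
lemma vRuns_nil : vRuns [] = [] := by rw [vRuns]

lemma vRuns_cons (c : Char) (cs : List Char) :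
    vRuns (c :: cs) = (PySem.Chars.isdigit c,
        c :: cs.takeWhile (fun x => PySem.Chars.isdigit x == PySem.Chars.isdigit c)) ::
      vRuns (cs.dropWhile (fun x => PySem.Chars.isdigit x == PySem.Chars.isdigit c)) := by
  conv_lhs => rw [vRuns]
  simp [vSplitRun]

-- the step function of A's second fold, named for the proofs
def vStep (num : List Char) (acc : List Char) (jp : Int × Int) : List Char :=
  match PySem.List.pyGet? num jp.1 with
  | some ch => PySem.List.pySetD acc jp.2 ch
  | none => acc

-- the digit positions of l, structurally
def posL : List Char → List Int
  | [] => []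
  | c :: cs => if PySem.Chars.isdigit c then 0 :: (posL cs).map (· + 1) else (posL cs).map (· + 1)

lemma posL_nonneg : ∀ l, ∀ p ∈ posL l, 0 ≤ p := by
  intro l
  induction l with
  | nil => simp [posL]
  | cons c cs ih =>
    intro p hp
    simp only [posL] at hp
    split at hp <;> simp only [List.mem_cons, List.mem_map] at hp
    · rcases hp with h | ⟨q, hq, rfl⟩
      · omega
      · have := ih q hq
        omega
    · rcases hp with ⟨q, hq, rfl⟩
      have := ih q hq; omega

lemma posL_length (l : List Char) :
    (posL l).length = l.countP (fun c => PySem.Chars.isdigit c) := by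
  induction l with
  | nil => simp [posL]
  | cons c cs ih =>
    simp only [posL, List.countP_cons]
    split <;> simp_all

lemma foldl_posL (l : List Char) : ∀ (s : Int) (acc : List Int),
    (PySem.List.enumerate l s).foldl
      (fun acc ic => if PySem.Chars.isdigit ic.2 then acc ++ [ic.1] else acc) acc
    = acc ++ (posL l).map (· + s) := by
  induction l with
  | nil => intro s acc; simp [PySem.List.enumerate_nil, posL]
  | cons c cs ih =>
    intro s acc
    rw [PySem.List.enumerate_cons, List.foldl_cons]
    simp only [posL]
    by_cases h : PySem.Chars.isdigit c
    · rw [if_pos h, if_pos h, ih (s + 1) (acc ++ [s]), List.map_cons, List.map_map]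
      have hm : List.map ((fun x => x + s) ∘ (fun x => x + 1)) (posL cs)
          = List.map (fun x => x + (s + 1)) (posL cs) :=
        List.map_congr_left (fun a _ => by simp [Function.comp]; ring)
      rw [hm]
      simp
    · rw [if_neg h, if_neg h, ih (s + 1) acc, List.map_map]
      congr 1
      exact List.map_congr_left (fun a _ => by simp [Function.comp]; ring)

lemma pyGet?_cons_shift (n : Char) (num : List Char) (j : Int) (hj : 0 ≤ j) :
    PySem.List.pyGet? (n :: num) (j + 1) = PySem.List.pyGet? num j := by
  rw [PySem.List.pyGet?_of_nonneg (n :: num) (show (0:Int) ≤ j + 1 by omega),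
    PySem.List.pyGet?_of_nonneg num hj]
  have h1 : (j + 1).toNat = j.toNat + 1 := by omega
  simp [h1]

lemma pySetD_cons_shift (x : Char) (l : List Char) (p : Int) (hp : 0 ≤ p) (v : Char) :
    PySem.List.pySetD (x :: l) (p + 1) v = x :: PySem.List.pySetD l p v := by
  rw [PySem.List.pySetD_of_nonneg (x :: l) v (show (0:Int) ≤ p + 1 by omega),
    PySem.List.pySetD_of_nonneg l v hp]
  have h1 : (p + 1).toNat = p.toNat + 1 := by omega
  simp [h1]

-- head preservation: one step on a shifted pair acts under the head
lemma vStep_shift_both (n : Char) (num : List Char) (x : Char) (l : List Char)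
    (j p : Int) (hj : 0 ≤ j) (hp : 0 ≤ p) :
    vStep (n :: num) (x :: l) (j + 1, p + 1) = x :: vStep num l (j, p) := by
  simp only [vStep, pyGet?_cons_shift n num j hj]
  cases PySem.List.pyGet? num j with
  | none => rfl
  | some ch => exact pySetD_cons_shift x l p hp ch

lemma vStep_shift_pos (num : List Char) (x : Char) (l : List Char)
    (j p : Int) (hp : 0 ≤ p) :
    vStep num (x :: l) (j, p + 1) = x :: vStep num l (j, p) := by
  simp only [vStep]
  cases PySem.List.pyGet? num j with
  | none => rfl
  | some ch => exact pySetD_cons_shift x l p hp ch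

lemma fold_shift_both (L : List Int) : ∀ (hL : ∀ p ∈ L, 0 ≤ p) (j0 : Int) (hj : 0 ≤ j0)
    (x : Char) (l : List Char) (n : Char) (num : List Char),
    (PySem.List.enumerate (L.map (· + 1)) (j0 + 1)).foldl (vStep (n :: num)) (x :: l)
    = x :: (PySem.List.enumerate L j0).foldl (vStep num) l := by
  induction L with
  | nil => intro _ j0 _ x l n num; simp [PySem.List.enumerate_nil]
  | cons p L ih =>
    intro hL j0 hj x l n num
    simp only [List.map_cons, PySem.List.enumerate_cons, List.foldl_cons]
    rw [vStep_shift_both n num x l j0 p hj (hL p (by simp))]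
    exact ih (fun q hq => hL q (by simp [hq])) (j0 + 1) (by omega) x _ n num

lemma fold_shift_pos (L : List Int) : ∀ (hL : ∀ p ∈ L, 0 ≤ p) (j0 : Int)
    (x : Char) (l : List Char) (num : List Char),
    (PySem.List.enumerate (L.map (· + 1)) j0).foldl (vStep num) (x :: l)
    = x :: (PySem.List.enumerate L j0).foldl (vStep num) l := by
  induction L with
  | nil => intro _ j0 x l num; simp [PySem.List.enumerate_nil]
  | cons p L ih =>
    intro hL j0 x l num
    simp only [List.map_cons, PySem.List.enumerate_cons, List.foldl_cons]
    rw [vStep_shift_pos num x l j0 p (hL p (by simp))]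
    exact ih (fun q hq => hL q (by simp [hq])) (j0 + 1) x _ num

-- A's set-fold over the digit positions is the streaming pass vGo
lemma fold_eq_vGo : ∀ (l num : List Char), (posL l).length ≤ num.length →
    (PySem.List.enumerate (posL l) 0).foldl (vStep num) l = vGo l num := by
  intro l
  induction l with
  | nil => intro num _; simp [posL, PySem.List.enumerate_nil, vGo]
  | cons c cs ih =>
    intro num hlen
    by_cases h : PySem.Chars.isdigit c
    · have hp : posL (c :: cs) = 0 :: (posL cs).map (· + 1) := by simp [posL, h]
      rw [hp] at hlen
      cases num with
      | nil => simp at hlen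
      | cons n ns =>
        rw [hp, PySem.List.enumerate_cons, List.foldl_cons]
        have step0 : vStep (n :: ns) (c :: cs) (0, 0) = n :: cs := by
          simp [vStep, PySem.List.pySetD_of_nonneg (c :: cs) n (le_refl (0 : Int))]
        rw [step0, fold_shift_both (posL cs) (posL_nonneg cs) 0 (le_refl 0) n cs n ns,
          ih ns (by simpa using hlen)]
        simp [vGo, h]
    · have hp : posL (c :: cs) = (posL cs).map (· + 1) := by simp [posL, h]
      rw [hp] at hlen
      rw [hp, fold_shift_pos (posL cs) (posL_nonneg cs) 0 c cs num,
        ih num (by simpa using hlen)]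
      simp [vGo, h]

-- ===== B-side lemmas: the run splicing is the same streaming pass =====

lemma vGo_digit_run : ∀ (run rest num : List Char),
    (∀ c ∈ run, PySem.Chars.isdigit c = true) → run.length ≤ num.length →
    vGo (run ++ rest) num = num.take run.length ++ vGo rest (num.drop run.length) := by
  intro run
  induction run with
  | nil => intro rest num _ _; simp
  | cons r rs ih =>
    intro rest num hd hlen
    cases num with
    | nil => simp at hlen
    | cons n ns =>
      simp only [List.cons_append, vGo, hd r (by simp), if_pos]
      rw [ih rest ns (fun c hc => hd c (by simp [hc])) (by simpa using hlen)]
      simp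

lemma vGo_nondigit_run : ∀ (run rest num : List Char),
    (∀ c ∈ run, PySem.Chars.isdigit c = false) →
    vGo (run ++ rest) num = run ++ vGo rest num := by
  intro run
  induction run with
  | nil => intro rest num _; simp
  | cons r rs ih =>
    intro rest num hd
    simp only [List.cons_append, vGo, hd r (by simp)]
    rw [ih rest num (fun c hc => hd c (by simp [hc]))]
    simp

-- the slot sum computed by B's foldl is the digit count of l
lemma slots_eq : ∀ (n : Nat) (l : List Char), l.length ≤ n → ∀ (a : Nat),
    (vRuns l).foldl (fun a dr => if dr.1 then a + dr.2.length else a) a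
    = a + l.countP (fun c => PySem.Chars.isdigit c) := by
  intro n
  induction n with
  | zero =>
    intro l hl a
    cases l with
    | nil => simp [vRuns_nil]
    | cons c cs => simp at hl
  | succ n ih =>
    intro l hl a
    cases l with
    | nil => simp [vRuns_nil]
    | cons c cs =>
      rw [vRuns_cons]
      simp only [List.foldl_cons]
      set d := PySem.Chars.isdigit c with hd
      set t := cs.takeWhile (fun x => PySem.Chars.isdigit x == d) with ht
      set dr := cs.dropWhile (fun x => PySem.Chars.isdigit x == d) with hdr
      have hsplit : t ++ dr = cs := List.takeWhile_append_dropWhile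
      have hdrlen : dr.length ≤ n := by
        have h1 : dr.length ≤ cs.length := by
          rw [hdr]; exact List.length_dropWhile_le _ cs
        simp only [List.length_cons] at hl
        omega
      have htmem : ∀ x ∈ t, PySem.Chars.isdigit x = d := by
        intro x hx
        rw [ht] at hx
        have := List.mem_takeWhile_imp hx
        simpa using this
      have hcount : cs.countP (fun c => PySem.Chars.isdigit c)
          = t.countP (fun c => PySem.Chars.isdigit c) + dr.countP (fun c => PySem.Chars.isdigit c) := by
        rw [← hsplit, List.countP_append]
      cases hdc : d with
      | true =>
        have hcd : PySem.Chars.isdigit c = true := by rw [← hd]; exact hdc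
        have htc : t.countP (fun c => PySem.Chars.isdigit c) = t.length := by
          rw [List.countP_eq_length]
          intro x hx
          rw [htmem x hx, hdc]
        rw [ih dr hdrlen]
        simp only [if_pos, List.length_cons, List.countP_cons, hcd, hcount, htc]
        ring
      | false =>
        have hcd : PySem.Chars.isdigit c = false := by rw [← hd]; exact hdc
        have htc : t.countP (fun c => PySem.Chars.isdigit c) = 0 := by
          rw [List.countP_eq_zero]
          intro x hx
          rw [htmem x hx, hdc]
          simp
        rw [ih dr hdrlen]
        simp only [Bool.false_eq_true, if_neg, not_false_iff, List.countP_cons, hcd,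
          hcount, htc]
        omega

-- B's run splicing equals the streaming pass when the number is long enough
lemma vFill_eq_vGo : ∀ (n : Nat) (l num : List Char), l.length ≤ n →
    l.countP (fun c => PySem.Chars.isdigit c) ≤ num.length →
    vFill (vRuns l) num = vGo l num := by
  intro n
  induction n with
  | zero =>
    intro l num hl _
    cases l with
    | nil => simp [vRuns_nil, vFill, vGo]
    | cons c cs => simp at hl
  | succ n ih =>
    intro l num hl hc
    cases l with
    | nil => simp [vRuns_nil, vFill, vGo]
    | cons c cs =>
      rw [vRuns_cons]
      set d := PySem.Chars.isdigit c with hd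
      set t := cs.takeWhile (fun x => PySem.Chars.isdigit x == d) with ht
      set dr := cs.dropWhile (fun x => PySem.Chars.isdigit x == d) with hdr
      have hsplit : t ++ dr = cs := List.takeWhile_append_dropWhile
      have hdrlen : dr.length ≤ n := by
        have h1 : dr.length ≤ cs.length := by
          rw [hdr]; exact List.length_dropWhile_le _ cs
        simp only [List.length_cons] at hl
        omega
      have htmem : ∀ x ∈ t, PySem.Chars.isdigit x = d := by
        intro x hx
        rw [ht] at hx
        have := List.mem_takeWhile_imp hx
        simpa using this
      have hcs : c :: cs = (c :: t) ++ dr := by rw [List.cons_append, hsplit]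
      have hcount : (c :: cs).countP (fun c => PySem.Chars.isdigit c)
          = (c :: t).countP (fun c => PySem.Chars.isdigit c) + dr.countP (fun c => PySem.Chars.isdigit c) := by
        rw [hcs, List.countP_append]
      cases hdc : d with
      | true =>
        have hrun : ∀ x ∈ c :: t, PySem.Chars.isdigit x = true := by
          intro x hx
          rcases List.mem_cons.mp hx with rfl | hx
          · rw [← hd]; exact hdc
          · rw [htmem x hx, hdc]
        have hruncnt : (c :: t).countP (fun c => PySem.Chars.isdigit c) = (c :: t).length := by
          rw [List.countP_eq_length]; exact fun x hx => hrun x hx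
        have hlen1 : (c :: t).length ≤ num.length := by
          rw [hcount, hruncnt] at hc
          omega
        rw [vFill]
        simp only [if_pos]
        conv_rhs => rw [hcs]
        rw [vGo_digit_run (c :: t) dr num hrun hlen1]
        congr 1
        exact ih dr (num.drop (c :: t).length) hdrlen (by
          rw [hcount, hruncnt] at hc
          simp only [List.length_drop]
          omega)
      | false =>
        have hrun : ∀ x ∈ c :: t, PySem.Chars.isdigit x = false := by
          intro x hx
          rcases List.mem_cons.mp hx with rfl | hx
          · rw [← hd]; exact hdc
          · rw [htmem x hx, hdc]
        have hruncnt : (c :: t).countP (fun c => PySem.Chars.isdigit c) = 0 := by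
          rw [List.countP_eq_zero]
          intro x hx
          rw [hrun x hx]; simp
        rw [vFill]
        simp only [Bool.false_eq_true, if_neg, not_false_iff]
        conv_rhs => rw [hcs]
        rw [vGo_nondigit_run (c :: t) dr num hrun]
        congr 1
        exact ih dr num hdrlen (by rw [hcount, hruncnt] at hc; omega)

-- ===== VERDICT (by name: the statement is the Claim_ definition above) =====
theorem vervangen_spec : Claim_equal_vervangen := by
  intro layout nummer _
  unfold Spec_vervangen vervangen vervangen_alt
  simp only []
  set l := layout.toList with hl
  set s := (PySem.Int.toStr nummer).toList with hs
  set cnt := l.countP (fun c => PySem.Chars.isdigit c) with hcnt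
  -- A's position list is posL l
  have hpos : (PySem.List.enumerate l 0).foldl
      (fun acc ic => if PySem.Chars.isdigit ic.2 then acc ++ [ic.1] else acc) ([] : List Int)
      = posL l := by
    rw [foldl_posL l 0 []]
    simp
  rw [hpos]
  -- B's slot sum is cnt
  rw [slots_eq l.length l (le_refl _) 0]
  simp only [Nat.zero_add, ← hcnt]
  -- the two padded numbers agree
  have hpad : (if (s.length : Int) - ((posL l).length : Int) < 0
        then List.replicate ((s.length : Int) - ((posL l).length : Int)).natAbs '0' ++ s else s)
      = (if s.length < cnt then List.replicate (cnt - s.length) '0' ++ s else s) := by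
    rw [posL_length l, ← hcnt]
    by_cases hc : s.length < cnt
    · rw [if_pos (by omega : (s.length : Int) - (cnt : Int) < 0), if_pos hc]
      congr 2
      omega
    · rw [if_neg (by omega : ¬ ((s.length : Int) - (cnt : Int) < 0)), if_neg hc]
  rw [hpad]
  set pad := (if s.length < cnt then List.replicate (cnt - s.length) '0' ++ s else s) with hpadd
  have hpadlen : cnt ≤ pad.length := by
    rw [hpadd]
    by_cases hc : s.length < cnt
    · rw [if_pos hc]; simp only [List.length_append, List.length_replicate]; omega
    · rw [if_neg hc]; omega
  -- A's second fold, with the named step function, is the streaming pass vGo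
  have hfold : (PySem.List.enumerate (posL l) 0).foldl
        (fun acc jp =>
          match PySem.List.pyGet? pad jp.1 with
          | some ch => PySem.List.pySetD acc jp.2 ch
          | none => acc) l
      = vGo l pad := by
    have := fold_eq_vGo l pad (by rw [posL_length l, ← hcnt]; omega)
    simpa [vStep] using this
  rw [hfold, vFill_eq_vGo l.length l pad (le_refl _) (by rw [← hcnt]; omega)]
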